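-- pv_equiv track=rewrite | github.com/AntonyXXu/Learning | Python practice/LeetCode/arithmetic_subarray.py | arith
-- ===== SOURCE A (Python) =====
-- def arith(nums, l, r):
--     if not nums or not l or not r:
--         return []
--     res = [False for i in range(len(l))]
--     for i in range(len(l)):
--         left = l[i]
--         right = r[i]
--         if left == right:
--             res[i] = True
--         else:
--             splice = nums[left:right + 1]
--             splice.sort()
--             diff = splice[1] - splice[0]
--             arithmetic = True
--             for j in range(len(splice)-1):
--                 if splice[j+1] - splice[j] != diff:
--                     arithmetic = False
--             res[i] = arithmetic
--     return res
-- ===== SOURCE B (Python) =====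
-- def arith(nums, l, r):
--     # Per query: sort-free min/max + divisibility + slot-marking check.
--     if not nums or not l or not r:
--         return []
--     res = []
--     for left, right in zip(l, r):
--         if left == right:
--             res.append(True)
--             continue
--         sub = nums[left:right + 1]
--         k = len(sub)
--         lo = min(sub)
--         hi = max(sub)
--         if lo == hi:
--             res.append(True)
--             continue
--         if (hi - lo) % (k - 1) != 0:
--             res.append(False)
--             continue
--         d = (hi - lo) // (k - 1)
--         seen = [False] * k
--         ok = True
--         for x in sub:
--             q, rem = divmod(x - lo, d)
--             if rem != 0 or seen[q]:
--                 ok = False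
--                 break
--             seen[q] = True
--         res.append(ok)
--     return res
-- ===== Notes on version B (the rewrite author's own statement) =====
-- stated objective: alternative
-- what changed: Each query's sort + adjacent-difference scan is replaced by a sort-free check: compute min/max, test divisibility of (max-min) by k-1, then one slot-marking pass that rejects a non-multiple offset or a duplicate slot (O(k) comparisons per query vs O(k log k), though not measurably faster in CPython).
import Mathlib
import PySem

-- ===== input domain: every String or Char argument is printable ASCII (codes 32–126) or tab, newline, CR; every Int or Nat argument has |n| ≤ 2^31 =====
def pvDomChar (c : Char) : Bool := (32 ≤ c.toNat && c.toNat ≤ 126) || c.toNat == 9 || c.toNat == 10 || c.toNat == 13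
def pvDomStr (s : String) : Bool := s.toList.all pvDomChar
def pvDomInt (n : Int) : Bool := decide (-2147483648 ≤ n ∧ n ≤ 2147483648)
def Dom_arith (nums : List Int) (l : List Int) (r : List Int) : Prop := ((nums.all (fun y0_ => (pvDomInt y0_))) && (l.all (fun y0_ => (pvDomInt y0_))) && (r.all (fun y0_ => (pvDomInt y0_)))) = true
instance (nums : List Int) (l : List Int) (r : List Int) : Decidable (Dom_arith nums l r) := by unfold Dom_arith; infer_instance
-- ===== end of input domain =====

-- B replaces A's per-query sort + adjacent-difference scan by a sort-free min/max +
-- divisibility + slot-marking check (objective: alternative algorithm, same measured cost).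

-- ===== PORT A =====
-- A's inner loop: for j in range(len(splice)-1): if splice[j+1]-splice[j] != diff: arithmetic = False
def arithInner (t : List Int) (diff : Int) : Bool :=
  (List.range (t.length - 1)).foldl
    (fun acc j => if t.getD (j + 1) 0 - t.getD j 0 ≠ diff then false else acc) true

def arith (nums : List Int) (l : List Int) (r : List Int) : List Bool :=
  if nums = [] ∨ l = [] ∨ r = [] then []
  else
    -- res = [False]*len(l); the loop assigns res[i] once per i, in order
    (List.range l.length).map (fun i =>
      let left := l.getD i 0          -- l[i], i < len(l) so exact
      let right := r.getD i 0         -- r[i]; raises IndexError when i ≥ len(r): excluded by Pre_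
      if left = right then true
      else
        let splice := PySem.List.sorted (PySem.List.slice nums (some left) (some (right + 1))) (fun x => x) false
        let diff := splice.getD 1 0 - splice.getD 0 0   -- splice[1] raises when len < 2: excluded by Pre_
        arithInner splice diff)

-- ===== PORT B =====
-- B's inner loop with break: mark slot (x-lo)//d; duplicate slot or remainder ⇒ not arithmetic
def scanSlots (d lo : Int) : List Int → List Bool → Bool
  | [], _ => true
  | x :: xs, seen =>
    let q := PySem.Int.floordiv (x - lo) d
    let rem := PySem.Int.mod (x - lo) d
    if rem ≠ 0 ∨ seen.getD q.toNat false then false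
    else scanSlots d lo xs (seen.set q.toNat true)

def arith_alt (nums : List Int) (l : List Int) (r : List Int) : List Bool :=
  if nums = [] ∨ l = [] ∨ r = [] then []
  else
    (List.zip l r).map (fun p =>
      if p.1 = p.2 then true
      else
        let sub := PySem.List.slice nums (some p.1) (some (p.2 + 1))
        let k := sub.length
        let lo := (PySem.List.min? sub (fun x => x)).getD 0   -- min([]) raises ValueError: excluded by Pre_
        let hi := (PySem.List.max? sub (fun x => x)).getD 0
        if lo = hi then true
        else if PySem.Int.mod (hi - lo) ((k : Int) - 1) ≠ 0 then false
        else
          scanSlots (PySem.Int.floordiv (hi - lo) ((k : Int) - 1)) lo sub (List.replicate k false))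

-- ===== PRECONDITION & SPEC =====
-- Pre_ excludes exactly the inputs on which A raises: queries needing r[i] beyond len(r)
-- (IndexError), and queries with left ≠ right whose slice has fewer than 2 elements
-- (splice[1] is an IndexError).  When nums, l or r is empty A returns [] and is covered.
def Pre_arith (nums : List Int) (l : List Int) (r : List Int) : Prop :=
  (nums = [] ∨ l = [] ∨ r = []) ∨
  (l.length ≤ r.length ∧ ∀ i ∈ List.range l.length,
      l.getD i 0 = r.getD i 0 ∨
      2 ≤ (PySem.List.slice nums (some (l.getD i 0)) (some (r.getD i 0 + 1))).length)
instance (nums : List Int) (l : List Int) (r : List Int) : Decidable (Pre_arith nums l r) := by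
  unfold Pre_arith; infer_instance

def pvWitness_arith : List Int × List Int × List Int := ([1, 3, 5, 2], [0, 2, 1], [2, 2, 3])

def Spec_arith (nums : List Int) (l : List Int) (r : List Int) (out : List Bool) : Prop := out = arith_alt nums l r
instance (nums : List Int) (l : List Int) (r : List Int) (out : List Bool) : Decidable (Spec_arith nums l r out) := by unfold Spec_arith; infer_instance

-- ===== CLAIM (what is proved, stated in full; the proofs are below) =====
def Claim_equal_arith : Prop := ∀ (nums : List Int) (l : List Int) (r : List Int), Dom_arith nums l r → Pre_arith nums l r → Spec_arith nums l r (arith nums l r)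

-- ===== LEMMAS AND PROOFS =====

-- the arithmetic progression lo, lo+d, …, lo+(k-1)d
def apList (lo d : Int) (k : Nat) : List Int := List.map (fun j : Nat => lo + d * (j : Int)) (List.range k)



-- B's else-branch as a function of the slice (proof-only helper)
def bBody (s : List Int) : Bool :=
  let k := s.length
  let lo := (PySem.List.min? s (fun x => x)).getD 0
  let hi := (PySem.List.max? s (fun x => x)).getD 0
  if lo = hi then true
  else if PySem.Int.mod (hi - lo) ((k : Int) - 1) ≠ 0 then false
  else scanSlots (PySem.Int.floordiv (hi - lo) ((k : Int) - 1)) lo s (List.replicate k false)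

-- A's else-branch as a function of the slice (proof-only helper)
def aBody (s : List Int) : Bool :=
  let t := PySem.List.sorted s (fun x => x) false
  arithInner t (t.getD 1 0 - t.getD 0 0)

lemma foldl_flag {α : Type} (p : α → Prop) [DecidablePred p] (L : List α) (acc : Bool) :
    L.foldl (fun a x => if p x then false else a) acc = (acc && L.all (fun x => decide (¬ p x))) := by
  induction L generalizing acc with
  | nil => simp
  | cons y ys ih =>
    rw [List.foldl_cons]
    by_cases h : p y
    · rw [if_pos h, ih]; simp [h]
    · rw [if_neg h, ih]; simp [h]

lemma arithInner_true_iff (t : List Int) (diff : Int) :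
    arithInner t diff = true ↔ ∀ j < t.length - 1, t.getD (j + 1) 0 - t.getD j 0 = diff := by
  unfold arithInner
  rw [foldl_flag (fun j => t.getD (j + 1) 0 - t.getD j 0 ≠ diff)]
  simp [List.all_eq_true, List.mem_range]

lemma length_apList (lo d : Int) (k : Nat) : (apList lo d k).length = k := by
  simp [apList]

lemma getD_apList (lo d : Int) {k j : Nat} (hj : j < k) :
    (apList lo d k).getD j 0 = lo + d * (j : Int) := by
  rw [List.getD_eq_getElem _ _ (by simpa [length_apList] using hj)]
  simp [apList]

lemma mem_apList {lo d x : Int} {k : Nat} :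
    x ∈ apList lo d k ↔ ∃ j : Nat, j < k ∧ x = lo + d * (j : Int) := by
  simp [apList, List.mem_range, eq_comm]

lemma pairwise_lt_apList (lo : Int) {d : Int} (hd : 0 < d) (k : Nat) :
    (apList lo d k).Pairwise (· < ·) := by
  unfold apList
  refine List.Pairwise.map _ ?_ (List.pairwise_lt_range)
  intro a b hab
  have h1 : (a : Int) < (b : Int) := by exact_mod_cast hab
  nlinarith

-- A's check succeeds iff the sorted slice is the arithmetic progression with step diff = t[1]-t[0]
lemma inner_ap {t : List Int} {diff : Int}
    (h : ∀ j < t.length - 1, t.getD (j + 1) 0 - t.getD j 0 = diff) :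
    ∀ j < t.length, t.getD j 0 = t.getD 0 0 + diff * (j : Int) := by
  intro j hj
  induction j with
  | zero => simp
  | succ n ih =>
    have hn : n < t.length - 1 := by omega
    have := h n hn
    have := ih (by omega)
    push_cast
    linarith

lemma scanSlots_true_iff (d lo : Int) (xs : List Int) (seen : List Bool)
    (hb : ∀ x ∈ xs, (PySem.Int.floordiv (x - lo) d).toNat < seen.length) :
    scanSlots d lo xs seen = true ↔
      ((∀ x ∈ xs, PySem.Int.mod (x - lo) d = 0
          ∧ seen.getD (PySem.Int.floordiv (x - lo) d).toNat false = false)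
        ∧ (xs.map (fun x => (PySem.Int.floordiv (x - lo) d).toNat)).Nodup) := by
  induction xs generalizing seen with
  | nil => simp [scanSlots]
  | cons x xs ih =>
    have hqx : (PySem.Int.floordiv (x - lo) d).toNat < seen.length := hb x (by simp)
    by_cases hrem : PySem.Int.mod (x - lo) d = 0
    · by_cases hs : seen.getD (PySem.Int.floordiv (x - lo) d).toNat false = true
      · simp only [scanSlots]
        rw [if_pos (Or.inr hs)]
        constructor
        · intro h; exact absurd h (by simp)
        · rintro ⟨h1, -⟩
          have := (h1 x (by simp)).2
          rw [hs] at this; exact absurd this (by simp)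
      · have hs' : seen.getD (PySem.Int.floordiv (x - lo) d).toNat false = false := by
          cases h : seen.getD (PySem.Int.floordiv (x - lo) d).toNat false
          · rfl
          · exact absurd h hs
        have hlen : ∀ y ∈ xs, (PySem.Int.floordiv (y - lo) d).toNat
            < (seen.set (PySem.Int.floordiv (x - lo) d).toNat true).length := by
          intro y hy; simpa using hb y (by simp [hy])
        have hset_self : (seen.set (PySem.Int.floordiv (x - lo) d).toNat true).getD
            (PySem.Int.floordiv (x - lo) d).toNat false = true := by
          rw [List.getD_eq_getElem _ _ (by simpa using hqx)]
          simp
        have hset_ne : ∀ j : Nat, j ≠ (PySem.Int.floordiv (x - lo) d).toNat →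
            (seen.set (PySem.Int.floordiv (x - lo) d).toNat true).getD j false
              = seen.getD j false := by
          intro j hj
          simp [List.getD_eq_getElem?_getD,
            List.getElem?_set_ne (by omega : (PySem.Int.floordiv (x - lo) d).toNat ≠ j)]
        simp only [scanSlots]
        rw [if_neg (by simp only [not_or, not_not]; exact ⟨hrem, by rw [hs']; simp⟩)]
        rw [ih _ hlen]
        simp only [List.map_cons, List.nodup_cons, List.mem_map, List.mem_cons]
        constructor
        · rintro ⟨h1, h2⟩
          refine ⟨?_, ?_, h2⟩
          · intro y hy
            rcases hy with rfl | hy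
            · exact ⟨hrem, hs'⟩
            · have := h1 y hy
              by_cases hq : (PySem.Int.floordiv (y - lo) d).toNat
                  = (PySem.Int.floordiv (x - lo) d).toNat
              · rw [hq, hset_self] at this; exact absurd this.2 (by simp)
              · rw [hset_ne _ hq] at this; exact this
          · rintro ⟨y, hy, hq⟩
            have := h1 y hy
            rw [hq, hset_self] at this
            exact absurd this.2 (by simp)
        · rintro ⟨h1, h2, h3⟩
          refine ⟨?_, h3⟩
          intro y hy
          have hyy := h1 y (Or.inr hy)
          have hq : (PySem.Int.floordiv (y - lo) d).toNat
              ≠ (PySem.Int.floordiv (x - lo) d).toNat := fun hq => h2 ⟨y, hy, hq⟩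
          rw [hset_ne _ hq]
          exact hyy
    · simp only [scanSlots]
      rw [if_pos (Or.inl hrem)]
      constructor
      · intro h; exact absurd h (by simp)
      · rintro ⟨h1, -⟩
        exact absurd (h1 x (by simp)).1 hrem

theorem pigeon_perm_range {L : List Nat} {k : Nat} (h1 : L.Nodup)
    (h2 : ∀ x ∈ L, x < k) (h3 : L.length = k) : L.Perm (List.range k) := by
  have hsub : L.Subperm (List.range k) :=
    List.subperm_of_subset h1 (fun x hx => List.mem_range.2 (h2 x hx))
  exact hsub.perm_of_length_le (by simp [h3])

-- B's slot scan succeeds exactly when the slice is a permutation of the progression m, m+dd, …, M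
lemma scan_iff_perm (s : List Int) (m M dd : Int) (k : Nat) (hk : 2 ≤ k) (hks : s.length = k)
    (hmin : ∀ y ∈ s, m ≤ y) (hmax : ∀ y ∈ s, y ≤ M)
    (hd : 0 < dd) (hMeq : M - m = dd * ((k : Int) - 1)) :
    scanSlots dd m s (List.replicate k false) = true ↔ s.Perm (apList m dd k) := by
  have hqlt : ∀ x ∈ s, (PySem.Int.floordiv (x - m) dd).toNat < k := by
    intro x hx
    have h1 : x - m < (k : Int) * dd := by
      have := hmax x hx
      nlinarith
    have h2 : PySem.Int.floordiv (x - m) dd < (k : Int) :=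
      (PySem.Int.floordiv_lt_iff_lt_mul hd).2 h1
    omega
  rw [scanSlots_true_iff dd m s (List.replicate k false)
      (by intro x hx; simpa using hqlt x hx)]
  have hrepl : ∀ j : Nat, (List.replicate k false).getD j false = false := by
    intro j; rw [List.getD_eq_getElem?_getD, List.getElem?_replicate]
    split <;> rfl
  have hq0 : ∀ x ∈ s, 0 ≤ PySem.Int.floordiv (x - m) dd := by
    intro x hx
    have h0 : (0 : Int) * dd ≤ x - m := by have := hmin x hx; nlinarith
    exact (PySem.Int.le_floordiv_iff_mul_le hd).2 h0
  constructor
  · rintro ⟨h1, h2⟩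
    have hdvd : ∀ x ∈ s, x = m + dd * ((PySem.Int.floordiv (x - m) dd).toNat : Int) := by
      intro x hx
      have hq := hq0 x hx
      have := PySem.Int.floordiv_mul_add_mod (x - m) dd
      rw [(h1 x hx).1] at this
      have htn : ((PySem.Int.floordiv (x - m) dd).toNat : Int) = PySem.Int.floordiv (x - m) dd := by
        omega
      rw [htn]; linarith
    have hL : (s.map (fun x => (PySem.Int.floordiv (x - m) dd).toNat)).Perm (List.range k) := by
      refine pigeon_perm_range h2 ?_ (by simp [hks])
      intro q hq
      rcases List.mem_map.1 hq with ⟨x, hx, rfl⟩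
      exact hqlt x hx
    have := hL.map (fun j : Nat => m + dd * (j : Int))
    rw [List.map_map] at this
    have hself : s.map ((fun j : Nat => m + dd * (j : Int)) ∘ (fun x => (PySem.Int.floordiv (x - m) dd).toNat)) = s := by
      have h := List.map_congr_left (l := s)
        (f := (fun j : Nat => m + dd * (j : Int)) ∘ (fun x => (PySem.Int.floordiv (x - m) dd).toNat))
        (g := id) (fun x hx => by simpa using (hdvd x hx).symm)
      rw [h, List.map_id]
    rw [hself] at this
    simpa [apList] using this
  · intro hperm
    have hform : ∀ x ∈ s, ∃ j : Nat, j < k ∧ x = m + dd * (j : Int) := by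
      intro x hx
      exact mem_apList.1 (hperm.mem_iff.1 hx)
    have hqf : ∀ j : Nat, (PySem.Int.floordiv (m + dd * (j : Int) - m) dd).toNat = j := by
      intro j
      have : m + dd * (j : Int) - m = dd * (j : Int) := by ring
      rw [this, PySem.Int.floordiv_eq_ediv_of_pos hd, Int.mul_ediv_cancel_left _ (by omega)]
      omega
    refine ⟨?_, ?_⟩
    · intro x hx
      rcases hform x hx with ⟨j, hj, rfl⟩
      have : m + dd * (j : Int) - m = dd * (j : Int) := by ring
      refine ⟨by rw [this, PySem.Int.mod_eq_zero_iff_dvd]; exact ⟨(j : Int), rfl⟩, hrepl _⟩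
    · have := hperm.map (fun x => (PySem.Int.floordiv (x - m) dd).toNat)
      refine this.nodup_iff.2 ?_
      have heq : (apList m dd k).map (fun x => (PySem.Int.floordiv (x - m) dd).toNat) = List.range k := by
        unfold apList
        rw [List.map_map]
        have h := List.map_congr_left (l := List.range k)
          (f := (fun x => (PySem.Int.floordiv (x - m) dd).toNat) ∘ (fun j : Nat => m + dd * (j : Int)))
          (g := id) (fun j _ => by simpa using hqf j)
        rw [h, List.map_id]
      rw [heq]
      exact List.nodup_range

-- A's sorted-adjacent-differences check, characterised by B's divisibility + slot scan
lemma aTrue_iff (s : List Int) (m M : Int) (hk : 2 ≤ s.length)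
    (hm_mem : m ∈ s) (hmin : ∀ y ∈ s, m ≤ y) (hM_mem : M ∈ s) (hmax : ∀ y ∈ s, y ≤ M)
    (hlt : m < M) :
    aBody s = true ↔
      (PySem.Int.mod (M - m) ((s.length : Int) - 1) = 0 ∧
        scanSlots (PySem.Int.floordiv (M - m) ((s.length : Int) - 1)) m s
          (List.replicate s.length false) = true) := by
  have htlen : (PySem.List.sorted s (fun x => x) false).length = s.length :=
    PySem.List.length_sorted s (fun x => x) false
  have htperm : (PySem.List.sorted s (fun x => x) false).Perm s :=
    PySem.List.sorted_perm s (fun x => x) false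
  set t := PySem.List.sorted s (fun x => x) false with ht
  have hk1 : (0 : Int) < (s.length : Int) - 1 := by
    have := hk; omega
  constructor
  · intro ha
    unfold aBody at ha
    rw [← ht, arithInner_true_iff] at ha
    have hap := inner_ap ha
    have h01 : t.getD 0 0 ≤ t.getD 1 0 := by
      rw [List.getD_eq_getElem _ _ (by omega), List.getD_eq_getElem _ _ (by omega)]
      simp only [ht]
      exact PySem.List.sorted_id_getElem_mono s (by omega)
        (by rw [PySem.List.length_sorted]; omega)
    have hdiff0 : 0 ≤ t.getD 1 0 - t.getD 0 0 := by omega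
    set diff := t.getD 1 0 - t.getD 0 0 with hdiffdef
    have hform : ∀ y ∈ t, ∃ j : Nat, j < t.length ∧ y = t.getD 0 0 + diff * (j : Int) := by
      intro y hy
      rcases List.mem_iff_getElem.1 hy with ⟨j, hj, rfl⟩
      exact ⟨j, hj, by rw [← List.getD_eq_getElem _ 0 hj]; exact hap j hj⟩
    have ht0mem : t.getD 0 0 ∈ s := by
      refine htperm.mem_iff.1 ?_
      rw [List.getD_eq_getElem _ _ (by omega)]
      exact List.getElem_mem _
    have hm0 : m = t.getD 0 0 := by
      rcases hform m (htperm.mem_iff.2 hm_mem) with ⟨j, hj, hmj⟩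
      have : 0 ≤ diff * (j : Int) := mul_nonneg hdiff0 (by positivity)
      have := hmin _ ht0mem
      omega
    have htlast_mem : t.getD (t.length - 1) 0 ∈ s := by
      refine htperm.mem_iff.1 ?_
      rw [List.getD_eq_getElem _ _ (by omega)]
      exact List.getElem_mem _
    have htlast : t.getD (t.length - 1) 0 = t.getD 0 0 + diff * ((t.length : Int) - 1) := by
      have := hap (t.length - 1) (by omega)
      rw [this]
      congr 1
      have : ((t.length - 1 : Nat) : Int) = (t.length : Int) - 1 := by omega
      rw [this]
    have hM0 : M = t.getD 0 0 + diff * ((t.length : Int) - 1) := by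
      rcases hform M (htperm.mem_iff.2 hM_mem) with ⟨j, hj, hMj⟩
      have hj1 : (j : Int) ≤ (t.length : Int) - 1 := by omega
      have h1 : M ≤ t.getD 0 0 + diff * ((t.length : Int) - 1) := by nlinarith
      have h2 : t.getD (t.length - 1) 0 ≤ M := hmax _ htlast_mem
      omega
    have hMeq : M - m = diff * ((s.length : Int) - 1) := by
      rw [hM0, hm0, htlen]; ring
    have hdpos : 0 < diff := by nlinarith
    have hdvd : ((s.length : Int) - 1) ∣ (M - m) := ⟨diff, by rw [hMeq]; ring⟩
    have hmod : PySem.Int.mod (M - m) ((s.length : Int) - 1) = 0 :=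
      (PySem.Int.mod_eq_zero_iff_dvd _ _).2 hdvd
    have hdd : PySem.Int.floordiv (M - m) ((s.length : Int) - 1) = diff := by
      rw [hMeq, PySem.Int.floordiv_eq_ediv_of_pos hk1, Int.mul_ediv_cancel _ (by omega)]
    refine ⟨hmod, ?_⟩
    rw [hdd]
    rw [scan_iff_perm s m M diff s.length hk rfl hmin hmax hdpos (by rw [hMeq])]
    have hteq : t = apList m diff s.length := by
      apply List.ext_getElem (by rw [htlen, length_apList])
      intro j hj hj'
      rw [← List.getD_eq_getElem t 0 hj, ← List.getD_eq_getElem _ 0 hj']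
      rw [hap j hj, getD_apList _ _ (by rwa [htlen] at hj), hm0]
    exact (hteq ▸ htperm).symm
  · rintro ⟨hmod, hscan⟩
    have hdvd : ((s.length : Int) - 1) ∣ (M - m) := (PySem.Int.mod_eq_zero_iff_dvd _ _).1 hmod
    set dd := PySem.Int.floordiv (M - m) ((s.length : Int) - 1) with hdddef
    have hMeq : M - m = dd * ((s.length : Int) - 1) := by
      have h := PySem.Int.floordiv_mul_add_mod (M - m) ((s.length : Int) - 1)
      rw [hmod] at h
      rw [← hdddef] at h
      linarith
    have hdpos : 0 < dd := by nlinarith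
    have hperm : s.Perm (apList m dd s.length) :=
      (scan_iff_perm s m M dd s.length hk rfl hmin hmax hdpos hMeq).1 hscan
    have hteq : t = apList m dd s.length := by
      rw [ht]
      exact PySem.List.sorted_eq_of_perm_of_pairwise_lt s _ _ hperm.symm
        (pairwise_lt_apList m hdpos s.length)
    unfold aBody
    rw [← ht, arithInner_true_iff]
    intro j hj
    rw [hteq, length_apList] at hj
    have h1k : 1 < s.length := by omega
    rw [hteq, getD_apList _ _ (by omega), getD_apList _ _ (by omega),
      getD_apList _ _ (by omega : 1 < s.length), getD_apList _ _ (by omega : 0 < s.length)]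
    push_cast
    ring

lemma body_eq (s : List Int) (hk : 2 ≤ s.length) : aBody s = bBody s := by
  have hne : s ≠ [] := by
    intro h; rw [h] at hk; simp at hk
  cases hm : PySem.List.min? s (fun x => x) with
  | none => exact absurd ((PySem.List.min?_eq_none_iff s (fun x => x)).1 hm) hne
  | some m =>
  cases hM : PySem.List.max? s (fun x => x) with
  | none => exact absurd ((PySem.List.max?_eq_none_iff s (fun x => x)).1 hM) hne
  | some M =>
  have hm_mem : m ∈ s := PySem.List.min?_mem hm
  have hM_mem : M ∈ s := PySem.List.max?_mem hM
  have hmin : ∀ y ∈ s, m ≤ y := fun y hy => by simpa using PySem.List.min?_isMin hm y hy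
  have hmax : ∀ y ∈ s, y ≤ M := fun y hy => by simpa using PySem.List.max?_isMax hM y hy
  simp only [bBody, hm, hM, Option.getD_some]
  by_cases heq : m = M
  · rw [if_pos heq]
    have hall : ∀ y ∈ s, y = m := fun y hy => le_antisymm (heq ▸ hmax y hy) (hmin y hy)
    have htperm : (PySem.List.sorted s (fun x => x) false).Perm s :=
      PySem.List.sorted_perm s (fun x => x) false
    unfold aBody
    rw [arithInner_true_iff]
    intro j hj
    have hget : ∀ i : Nat, i < (PySem.List.sorted s (fun x => x) false).length →
        (PySem.List.sorted s (fun x => x) false).getD i 0 = m := by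
      intro i hi
      rw [List.getD_eq_getElem _ _ hi]
      exact hall _ (htperm.mem_iff.1 (List.getElem_mem _))
    have hlen2 : 2 ≤ (PySem.List.sorted s (fun x => x) false).length := by
      rw [PySem.List.length_sorted]; exact hk
    rw [hget j (by omega), hget (j + 1) (by omega), hget 1 (by omega), hget 0 (by omega)]
  · rw [if_neg heq]
    have hlt : m < M := lt_of_le_of_ne (hmin M hM_mem) heq
    have hiff := aTrue_iff s m M hk hm_mem hmin hM_mem hmax hlt
    by_cases hmod : PySem.Int.mod (M - m) ((s.length : Int) - 1) = 0
    · rw [if_neg (by simpa using hmod)]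
      cases hscan : scanSlots (PySem.Int.floordiv (M - m) ((s.length : Int) - 1)) m s
          (List.replicate s.length false) with
      | true => exact hiff.2 ⟨hmod, hscan⟩
      | false =>
        cases h : aBody s with
        | false => rfl
        | true =>
          have h2 := (hiff.1 h).2
          rw [hscan] at h2
          exact absurd h2 (by simp)
    · rw [if_pos (by simpa using hmod)]
      cases h : aBody s with
      | false => rfl
      | true => exact absurd (hiff.1 h).1 hmod

-- ===== VERDICT (by name: the statement is the Claim_ definition above) =====
theorem arith_spec : Claim_equal_arith := by
  intro nums l r _hdom hpre
  unfold Spec_arith arith arith_alt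
  by_cases hempty : nums = [] ∨ l = [] ∨ r = []
  · rw [if_pos hempty, if_pos hempty]
  · rw [if_neg hempty, if_neg hempty]
    rcases hpre with h | ⟨hlen, hq⟩
    · exact absurd h hempty
    apply List.ext_getElem
    · simp [hlen]
    intro i hi1 hi2
    have hil : i < l.length := by simpa using hi1
    have hir : i < r.length := by omega
    rw [List.getElem_map, List.getElem_map, List.getElem_range, List.getElem_zip]
    simp only
    have hgl : l.getD i 0 = l[i] := List.getD_eq_getElem l 0 hil
    have hgr : r.getD i 0 = r[i] := List.getD_eq_getElem r 0 hir
    rw [hgl, hgr]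
    by_cases hlr : l[i] = r[i]
    · rw [if_pos hlr, if_pos hlr]
    · rw [if_neg hlr, if_neg hlr]
      have hslice : 2 ≤ (PySem.List.slice nums (some l[i]) (some (r[i] + 1))).length := by
        rcases hq i (List.mem_range.2 hil) with h | h
        · rw [hgl, hgr] at h; exact absurd h hlr
        · rwa [hgl, hgr] at h
      exact body_eq (PySem.List.slice nums (some l[i]) (some (r[i] + 1))) hslice
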